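-- pv_equiv track=rewrite | github.com/mohamadrizwan202/startup | scripts/seo_autopilot.py | unique_extend
-- ===== SOURCE A (Python) =====
-- from typing import Dict, List, Set, Tuple
--
-- def unique_extend(lst: List[str], items: List[str]) -> int:
--     before = len(lst)
--     seen = set(lst)
--     for x in items:
--         if x and x not in seen:
--             lst.append(x)
--             seen.add(x)
--     return len(lst) - before
-- ===== SOURCE B (Python) =====
-- def unique_extend(lst, items):
--     original_seen = set(lst)
--     to_add = [x for x in dict.fromkeys(items) if x and x not in original_seen]
--     lst.extend(to_add)
--     return len(to_add)
-- ===== Notes on version B (the rewrite author's own statement) =====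
-- stated objective: alternative
-- what changed: Instead of one loop that mutates a growing seen set and appends element by element, B dedups items once with dict.fromkeys (first occurrences), filters against a snapshot set of lst in a single pass with no incremental state, then extends lst in one call and returns the length of the filtered list.
import Mathlib
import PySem

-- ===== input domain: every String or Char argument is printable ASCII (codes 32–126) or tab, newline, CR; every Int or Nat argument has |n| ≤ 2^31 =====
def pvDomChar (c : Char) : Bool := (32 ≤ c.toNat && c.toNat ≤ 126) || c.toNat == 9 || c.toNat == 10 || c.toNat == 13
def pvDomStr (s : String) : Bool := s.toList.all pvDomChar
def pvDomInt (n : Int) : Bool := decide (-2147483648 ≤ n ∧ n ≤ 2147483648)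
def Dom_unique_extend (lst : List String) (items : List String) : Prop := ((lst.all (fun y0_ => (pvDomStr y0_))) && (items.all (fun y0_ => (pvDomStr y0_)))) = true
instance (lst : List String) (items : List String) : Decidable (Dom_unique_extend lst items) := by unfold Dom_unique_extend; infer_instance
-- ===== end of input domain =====

-- B changes the decomposition only (same cost): dedup-then-filter against a snapshot, no incremental seen-set.
-- A mutates lst in place; equivalence proved here is about the RETURN value (B performs the same mutation in Python).

-- ===== PORT A =====
-- for x in items: if x and x not in seen: lst.append(x); seen.add(x)  — state (lst, seen)
def unique_extend (lst : List String) (items : List String) : Int :=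
  let before : Int := (lst.length : Int)
  let seen : PySem.Set String := PySem.Set.ofList lst
  let st := items.foldl
    (fun (st : List String × PySem.Set String) x =>
      if x ≠ "" ∧ ¬ PySem.Set.contains st.2 x then (st.1 ++ [x], PySem.Set.add st.2 x) else st)
    (lst, seen)
  (st.1.length : Int) - before

-- ===== PORT B =====
def unique_extend_alt (lst : List String) (items : List String) : Int :=
  let originalSeen : PySem.Set String := PySem.Set.ofList lst
  let toAdd : List String :=
    (PySem.List.dedup items).filter (fun x => x ≠ "" ∧ ¬ PySem.Set.contains originalSeen x)
  (toAdd.length : Int)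

-- ===== PRECONDITION & SPEC =====
def Spec_unique_extend (lst : List String) (items : List String) (out : Int) : Prop := out = unique_extend_alt lst items
instance (lst : List String) (items : List String) (out : Int) : Decidable (Spec_unique_extend lst items out) := by unfold Spec_unique_extend; infer_instance

-- ===== CLAIM (what is proved, stated in full; the proofs are below) =====
def Claim_equal_unique_extend : Prop := ∀ (lst : List String) (items : List String), Dom_unique_extend lst items → Spec_unique_extend lst items (unique_extend lst items)

-- ===== LEMMAS AND PROOFS =====

-- shorthand for A's loop step
def pvStep (st : List String × PySem.Set String) (x : String) : List String × PySem.Set String :=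
  if x ≠ "" ∧ ¬ PySem.Set.contains st.2 x then (st.1 ++ [x], PySem.Set.add st.2 x) else st

-- B's filter predicate, relative to a snapshot list l
def pvP (l : List String) (x : String) : Bool := decide (x ≠ "" ∧ ¬ PySem.Set.contains (PySem.Set.ofList l) x)

lemma pvP_iff (l : List String) (x : String) : pvP l x = true ↔ (x ≠ "" ∧ x ∉ l) := by
  simp [pvP, PySem.Set.mem_ofList]

-- discarding an element the predicate rejects does not change the filter
lemma filter_discard_of_false (l : List String) (x : String) (h : pvP l x = false) (d : List String) :
    (PySem.Set.discard d x).filter (pvP l) = d.filter (pvP l) := by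
  induction d with
  | nil => rfl
  | cons y d ih =>
    by_cases hyx : y = x
    · subst hyx
      simp [PySem.Set.discard, List.filter, h] at *
      simpa [PySem.Set.discard] using ih
    · simp only [PySem.Set.discard, List.filter] at *
      have : (!y == x) = true := by simp [hyx]
      simp [this]
      cases hp : pvP l y <;> simp [List.filter, hp, ih]

-- extending the snapshot by x is the same as discarding x first
lemma filter_snapshot_extend (l : List String) (x : String) (d : List String) :
    d.filter (pvP (l ++ [x])) = (PySem.Set.discard d x).filter (pvP l) := by
  induction d with
  | nil => rfl
  | cons y d ih =>
    by_cases hyx : y = x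
    · subst hyx
      have h1 : pvP (l ++ [y]) y = false := by
        simp [pvP]
      simp [PySem.Set.discard, List.filter, h1] at *
      simpa [PySem.Set.discard] using ih
    · have h2 : pvP (l ++ [x]) y = pvP l y := by
        simp [pvP, PySem.Set.mem_ofList, hyx]
      have : (!y == x) = true := by simp [hyx]
      simp only [PySem.Set.discard, List.filter, this] at *
      rw [h2]
      cases hp : pvP l y <;> simp [ih]

-- loop invariant: A's fold from (l, set(l)) produces l ++ (dedup items).filter (pvP l)
lemma fold_eq (items : List String) : ∀ (l : List String),
    (items.foldl pvStep (l, PySem.Set.ofList l)).1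
      = l ++ (PySem.List.dedup items).filter (pvP l) := by
  induction items with
  | nil => intro l; simp [PySem.List.dedup, PySem.Set.ofList]
  | cons x items ih =>
    intro l
    have hdedup : PySem.List.dedup (x :: items)
        = x :: PySem.Set.discard (PySem.List.dedup items) x := by
      simp [PySem.List.dedup, PySem.Set.ofList_cons]
    by_cases hx : x ≠ "" ∧ x ∉ l
    · have hstep : pvStep (l, PySem.Set.ofList l) x = (l ++ [x], PySem.Set.ofList (l ++ [x])) := by
        simp [pvStep, PySem.Set.mem_ofList, hx.1, hx.2,
          PySem.Set.ofList_append_singleton]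
      have hp : pvP l x = true := (pvP_iff l x).mpr hx
      rw [List.foldl_cons, hstep, ih (l ++ [x]), hdedup]
      simp [List.filter, hp, filter_snapshot_extend l x]
    · have hp : pvP l x = false := by
        cases h : pvP l x
        · rfl
        · exact absurd ((pvP_iff l x).mp h) hx
      have hstep : pvStep (l, PySem.Set.ofList l) x = (l, PySem.Set.ofList l) := by
        by_cases he : x = ""
        · simp [pvStep, he]
        · have hmem : x ∈ l := by
            by_contra hnm; exact hx ⟨he, hnm⟩
          simp [pvStep, PySem.Set.mem_ofList, hmem]
      rw [List.foldl_cons, hstep, ih l, hdedup]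
      simp [List.filter, hp, filter_discard_of_false l x hp]

lemma unique_extend_eq (lst items : List String) :
    unique_extend lst items = unique_extend_alt lst items := by
  show ((items.foldl pvStep (lst, PySem.Set.ofList lst)).1.length : Int) - (lst.length : Int)
      = (((PySem.List.dedup items).filter (pvP lst)).length : Int)
  rw [fold_eq items lst]
  simp only [List.length_append]
  push_cast
  ring

-- ===== VERDICT (by name: the statement is the Claim_ definition above) =====
theorem unique_extend_spec : Claim_equal_unique_extend := by
  intro lst items _
  exact unique_extend_eq lst items
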